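-- pv_equiv track=rewrite | github.com/MilenaVujicic/PIDAIJ | v2/number_gen_iter.py | hex_dictionary
-- ===== SOURCE A (Python) =====
-- import math
--
-- def number_generator(n):
--     for arr in range(1, n+1):
--         yield arr
--
-- def is_prime(a):
--     flag = True
--     for b in range(2, math.floor(math.sqrt(a))+1):
--         if a%b == 0:
--             flag = False
--
--     return flag
--
-- def prime_number(n):
--     arr = number_generator(n)
--     for a in arr:
--         if is_prime(a):
--             yield a
--
-- def prime_to_hex_yield(n):
--     for i in prime_number(n):
--         yield hex(i)
--
-- def hex_dictionary(n):
--     ret_dict = {}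
--     arr = prime_to_hex_yield(n)
--
--     for a in arr:
--         for char in a[2:]:
--             if char in ret_dict.keys():
--                 ret_dict[char] += 1
--             else:
--                 ret_dict[char] = 1
--     return ret_dict
-- ===== SOURCE B (Python) =====
-- import math
--
-- def hex_dictionary(n):
--     # Sieve of Eratosthenes (1 passes, matching A's trial-division test),
--     # then one pass counting hex digits of each kept number.
--     if n < 1:
--         return {}
--     is_comp = [False] * (n + 1)
--     for p in range(2, math.isqrt(n) + 1):
--         if not is_comp[p]:
--             for k in range(p, n // p + 1):
--                 is_comp[p * k] = True
--     counts = {}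
--     for a in range(1, n + 1):
--         if not is_comp[a]:
--             for ch in format(a, 'x'):
--                 counts[ch] = counts.get(ch, 0) + 1
--     return counts
-- ===== Notes on version B (the rewrite author's own statement) =====
-- stated objective: faster
-- what changed: Replaced A's per-number trial division over range(2, floor(sqrt(a))+1) (run for every a up to n, via a chain of generators) with a Sieve of Eratosthenes over a single boolean array (1 stays unmarked exactly as A's test leaves it), then one pass counting hex digits of the unmarked numbers.
import Mathlib
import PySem

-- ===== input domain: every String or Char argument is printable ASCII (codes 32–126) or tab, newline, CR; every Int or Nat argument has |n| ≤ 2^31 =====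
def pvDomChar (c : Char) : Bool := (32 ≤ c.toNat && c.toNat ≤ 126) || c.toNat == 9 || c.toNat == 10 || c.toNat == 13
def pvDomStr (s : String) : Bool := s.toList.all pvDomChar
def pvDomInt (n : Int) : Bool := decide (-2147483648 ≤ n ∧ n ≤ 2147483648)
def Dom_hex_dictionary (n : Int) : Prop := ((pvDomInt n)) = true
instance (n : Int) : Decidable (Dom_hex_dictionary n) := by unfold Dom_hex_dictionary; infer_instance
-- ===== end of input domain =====

-- B replaces A's per-number trial division (O(n·√n)) with a Sieve of Eratosthenes
-- (1 stays unmarked, matching A's trial-division test), then counts hex digits; objective: faster.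

-- ===== PORT A =====

-- math.floor(math.sqrt(a)) for 0 ≤ a ≤ 2^31: the double-precision sqrt is exact enough
-- there that flooring it equals the integer square root.
def pvSqrtFloor (a : Int) : Int := (Nat.sqrt a.toNat : Int)

-- hex digits of m (lowercase, most significant first); hex(m) = "0x" ++ these for m ≥ 1
def pvHexDigits : Nat → List Char
  | 0 => []
  | (m+1) => pvHexDigits ((m+1) / 16) ++ [(Nat.digitChar ((m+1) % 16))]
decreasing_by exact Nat.div_lt_self (Nat.succ_pos m) (by omega)

-- is_prime: trial division over range(2, floor(sqrt(a))+1), flag never short-circuits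
def is_prime (a : Int) : Bool :=
  (PySem.List.pyRange 2 (pvSqrtFloor a + 1) 1).foldl
    (fun flag b => if PySem.Int.mod a b == 0 then false else flag) true

-- prime_to_hex_yield(n): the generator pipeline produces hex(a) (as its char list) for
-- each a in range(1, n+1) passing is_prime; hex(a) for a ≥ 1 is '0'..'x'..digits
def prime_to_hex (n : Int) : List (List Char) :=
  ((PySem.List.pyRange 1 (n + 1) 1).filter is_prime).map
    (fun a => '0' :: 'x' :: pvHexDigits a.toNat)

def hex_dictionary (n : Int) : List (String × Int) :=
  ((prime_to_hex n).foldl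
    (fun d a =>
      -- for char in a[2:]  (the slice drops the "0x" prefix)
      (a.drop 2).foldl
        (fun d ch =>
          let s := String.ofList [ch]
          match d.get? s with          -- if char in ret_dict.keys()
          | some v => d.insert s (v + 1)
          | none   => d.insert s 1) d)
    PySem.Dict.empty).items

-- ===== PORT B =====

-- inner loop: for k in range(p, n//p+1): is_comp[p*k] = True   (index p*k is in range)
def pvSieveInner (n p : Int) (arr : List Bool) : List Bool :=
  (PySem.List.pyRange p (PySem.Int.floordiv n p + 1) 1).foldl
    (fun arr k => PySem.List.pySetD arr (p * k) true) arr

-- outer loop body: if not is_comp[p]: mark multiples of p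
def pvSieveStep (n : Int) (arr : List Bool) (p : Int) : List Bool :=
  if PySem.List.pyGetD arr p false = false then pvSieveInner n p arr else arr

def hex_dictionary_alt (n : Int) : List (String × Int) :=
  if n < 1 then [] else
    let sieve := (PySem.List.pyRange 2 (pvSqrtFloor n + 1) 1).foldl
        (pvSieveStep n) (List.replicate (n + 1).toNat false)
    ((PySem.List.pyRange 1 (n + 1) 1).foldl
      (fun d a =>
        if PySem.List.pyGetD sieve a false = false then
          (pvHexDigits a.toNat).foldl      -- format(a, 'x')
            (fun d ch =>
              let s := String.ofList [ch]
              d.insert s (d.getD s 0 + 1)) d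
        else d)
      PySem.Dict.empty).items

-- ===== PRECONDITION & SPEC =====
def Spec_hex_dictionary (n : Int) (out : List (String × Int)) : Prop := out = hex_dictionary_alt n
instance (n : Int) (out : List (String × Int)) : Decidable (Spec_hex_dictionary n out) := by unfold Spec_hex_dictionary; infer_instance

-- ===== CLAIM (what is proved, stated in full; the proofs are below) =====
def Claim_equal_hex_dictionary : Prop := ∀ (n : Int), Dom_hex_dictionary n → Spec_hex_dictionary n (hex_dictionary n)

-- ===== LEMMAS AND PROOFS =====

-- a has a divisor b with 2 <= b and b*b <= a (the condition A's trial division detects)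
def HasSmallDiv (a : Int) : Prop := ∃ b : Int, 2 ≤ b ∧ b * b ≤ a ∧ b ∣ a

def pvSieve (n : Int) : List Bool :=
  (PySem.List.pyRange 2 (pvSqrtFloor n + 1) 1).foldl
    (pvSieveStep n) (List.replicate (n + 1).toNat false)

-- i is a product p*k with 2 <= p <= k (exactly what sieve writes can mark)
def CompN (i : Nat) : Prop := ∃ p k : Nat, 2 ≤ p ∧ p ≤ k ∧ p * k = i

theorem lt_sqrtFloor_add_one (a b : Int) (ha : 0 ≤ a) (hb : 0 ≤ b) :
    b < pvSqrtFloor a + 1 ↔ b * b ≤ a := by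
  unfold pvSqrtFloor
  have h1 : b < (Nat.sqrt a.toNat : Int) + 1 ↔ b.toNat ≤ Nat.sqrt a.toNat := by omega
  rw [h1, Nat.le_sqrt]
  constructor
  · intro h
    have := Int.ofNat_le.mpr h
    push_cast [Int.toNat_of_nonneg ha, Int.toNat_of_nonneg hb] at this
    exact this
  · intro h
    have hbb : ((b.toNat * b.toNat : Nat) : Int) ≤ ((a.toNat : Nat) : Int) := by
      push_cast [Int.toNat_of_nonneg ha, Int.toNat_of_nonneg hb]
      exact h
    exact_mod_cast hbb

theorem is_prime_iff (a : Int) (ha : 0 ≤ a) :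
    is_prime a = true ↔ ¬ HasSmallDiv a := by
  unfold is_prime
  rw [PySem.List.foldl_if_false_eq (p := fun b => PySem.Int.mod a b == 0)]
  simp only [Bool.true_and, Bool.not_eq_eq_eq_not, Bool.not_true, Bool.not_eq_true,
    List.any_eq_false]
  constructor
  · intro h ⟨b, hb2, hbb, hdvd⟩
    have hmem : b ∈ PySem.List.pyRange 2 (pvSqrtFloor a + 1) :=
      PySem.List.mem_pyRange_one.mpr ⟨hb2, (lt_sqrtFloor_add_one a b ha (by omega)).mpr hbb⟩
    have := h b hmem
    rw [beq_eq_false_iff_ne] at this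
    exact this ((PySem.Int.mod_eq_zero_iff_dvd a b).mpr hdvd)
  · intro h b hmem
    obtain ⟨hb2, hlt⟩ := PySem.List.mem_pyRange_one.mp hmem
    rw [beq_eq_false_iff_ne]
    intro hmod
    exact h ⟨b, hb2, (lt_sqrtFloor_add_one a b ha (by omega)).mp hlt,
      (PySem.Int.mod_eq_zero_iff_dvd a b).mp hmod⟩

theorem comp_iff (a : Int) (ha : 1 ≤ a) : CompN a.toNat ↔ HasSmallDiv a := by
  constructor
  · rintro ⟨p, k, hp, hpk, hmul⟩
    refine ⟨(p : Int), by exact_mod_cast hp, ?_, ⟨(k : Int), ?_⟩⟩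
    · have : (p * p : Nat) ≤ a.toNat := le_trans (Nat.mul_le_mul_left p hpk) (le_of_eq hmul)
      have := Int.ofNat_le.mpr this
      push_cast at this
      rwa [Int.toNat_of_nonneg (by omega)] at this
    · have : ((p * k : Nat) : Int) = ((a.toNat : Nat) : Int) := by exact_mod_cast hmul
      push_cast at this
      rw [Int.toNat_of_nonneg (by omega)] at this
      omega
  · rintro ⟨b, hb2, hbb, hdvd⟩
    have hb0 : 0 < b := by omega
    have hk : b * (a / b) = a := Int.mul_ediv_cancel' hdvd
    have hble : b ≤ a / b := by
      by_contra hlt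
      push Not at hlt
      have : b * (a / b) < b * b := by
        apply Int.mul_lt_mul_of_pos_left hlt hb0
      omega
    refine ⟨b.toNat, (a / b).toNat, by omega, by omega, ?_⟩
    have h1 : (0:Int) ≤ a / b := Int.ediv_nonneg (by omega) (by omega)
    have : ((b.toNat * (a / b).toNat : Nat) : Int) = a := by
      push_cast
      rw [Int.toNat_of_nonneg (by omega), Int.toNat_of_nonneg h1]
      exact hk
    omega

theorem not_compN_of_prime (q : Nat) (hq : q.Prime) : ¬ CompN q := by
  rintro ⟨p, k, hp2, hpk, hmul⟩
  have hpdvd : p ∣ q := ⟨k, hmul.symm⟩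
  rcases (Nat.Prime.eq_one_or_self_of_dvd hq p hpdvd) with h | h
  · omega
  · subst h
    nlinarith

-- pySetD always acts as a List.set (possibly out of bounds, hence the identity)
theorem pySetD_eq_set (arr : List Bool) (j : Int) (v : Bool) :
    ∃ m : Nat, PySem.List.pySetD arr j v = arr.set m v := by
  unfold PySem.List.pySetD PySem.List.pySet?
  cases h : PySem.List.pyIdx? arr.length j with
  | none => exact ⟨arr.length, by simp [List.set_eq_of_length_le]⟩
  | some m => exact ⟨m, rfl⟩

theorem getD_set_true (arr : List Bool) (m i : Nat) (h : arr.getD i false = true) :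
    (arr.set m true).getD i false = true := by
  simp only [List.getD_eq_getElem?_getD, List.getElem?_set] at *
  split
  · split
    · simp
    · next h1 h2 =>
      subst h1
      rw [List.getElem?_eq_none (by omega)] at h
      simp at h
  · exact h

theorem getD_pySetD_true (arr : List Bool) (j : Int) (i : Nat)
    (h : arr.getD i false = true) :
    (PySem.List.pySetD arr j true).getD i false = true := by
  obtain ⟨m, hm⟩ := pySetD_eq_set arr j true
  rw [hm]
  exact getD_set_true arr m i h

theorem getD_pySetD_self (arr : List Bool) (j : Int) (hj : 0 ≤ j)
    (hlt : j.toNat < arr.length) :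
    (PySem.List.pySetD arr j true).getD j.toNat false = true := by
  rw [PySem.List.pySetD_of_nonneg arr true hj]
  simp [List.getD_eq_getElem?_getD, hlt]

-- every marked index of arr is a product p*k with 2 <= p <= k
def SieveSound (arr : List Bool) : Prop := ∀ i : Nat, arr.getD i false = true → CompN i

theorem inner_length (p : Int) (l : List Int) (arr : List Bool) :
    (l.foldl (fun arr k => PySem.List.pySetD arr (p * k) true) arr).length = arr.length := by
  induction l generalizing arr with
  | nil => rfl
  | cons k t ih => simp [List.foldl_cons, ih, PySem.List.length_pySetD]

theorem inner_mono (p : Int) (l : List Int) (arr : List Bool) (i : Nat)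
    (h : arr.getD i false = true) :
    (l.foldl (fun arr k => PySem.List.pySetD arr (p * k) true) arr).getD i false = true := by
  induction l generalizing arr with
  | nil => exact h
  | cons k t ih => exact ih _ (getD_pySetD_true arr _ i h)

theorem inner_sound (p : Int) (hp : 2 ≤ p) (l : List Int) (hl : ∀ k ∈ l, p ≤ k)
    (arr : List Bool) (hs : SieveSound arr) :
    SieveSound (l.foldl (fun arr k => PySem.List.pySetD arr (p * k) true) arr) := by
  induction l generalizing arr with
  | nil => exact hs
  | cons k t ih =>
    refine ih (fun x hx => hl x (List.mem_cons_of_mem _ hx)) _ ?_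
    intro i hi
    have hk : p ≤ k := hl k List.mem_cons_self
    have hpk : 0 ≤ p * k := mul_nonneg (by omega) (by omega)
    change (PySem.List.pySetD arr (p * k) true).getD i false = true at hi
    rw [PySem.List.pySetD_of_nonneg arr true hpk] at hi
    simp only [List.getD_eq_getElem?_getD, List.getElem?_set] at hi
    by_cases hcase : (p * k).toNat = i
    · subst hcase
      refine ⟨p.toNat, k.toNat, by omega, by omega, ?_⟩
      have : ((p.toNat * k.toNat : Nat) : Int) = p * k := by
        push_cast
        rw [Int.toNat_of_nonneg (by omega), Int.toNat_of_nonneg (by omega)]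
      omega
    · rw [if_neg hcase] at hi
      exact hs i (by simpa [List.getD_eq_getElem?_getD] using hi)

theorem inner_complete (p k0 : Int) (h0 : 0 ≤ p * k0) :
    ∀ (l : List Int) (arr : List Bool), k0 ∈ l → (p * k0).toNat < arr.length →
    (l.foldl (fun arr k => PySem.List.pySetD arr (p * k) true) arr).getD (p * k0).toNat false = true := by
  intro l
  induction l with
  | nil => intro arr hmem; cases hmem
  | cons k t ih =>
    intro arr hmem hlt
    rcases List.mem_cons.mp hmem with rfl | hmem'
    · exact inner_mono p t _ _ (getD_pySetD_self arr (p * k0) h0 hlt)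
    · exact ih _ hmem' (by rw [PySem.List.length_pySetD]; exact hlt)

theorem outer_length (n : Int) (l : List Int) (arr : List Bool) :
    (l.foldl (pvSieveStep n) arr).length = arr.length := by
  induction l generalizing arr with
  | nil => rfl
  | cons p t ih =>
    simp only [List.foldl_cons, ih]
    unfold pvSieveStep pvSieveInner
    split
    · exact inner_length _ _ _
    · rfl

theorem outer_mono (n : Int) (l : List Int) (arr : List Bool) (i : Nat)
    (h : arr.getD i false = true) :
    (l.foldl (pvSieveStep n) arr).getD i false = true := by
  induction l generalizing arr with
  | nil => exact h
  | cons p t ih =>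
    refine ih _ ?_
    unfold pvSieveStep pvSieveInner
    split
    · exact inner_mono _ _ _ _ h
    · exact h

theorem outer_sound (n : Int) (l : List Int) (hl : ∀ p ∈ l, 2 ≤ p)
    (arr : List Bool) (hs : SieveSound arr) :
    SieveSound (l.foldl (pvSieveStep n) arr) := by
  induction l generalizing arr with
  | nil => exact hs
  | cons p t ih =>
    refine ih (fun x hx => hl x (List.mem_cons_of_mem _ hx)) _ ?_
    have hp : 2 ≤ p := hl p List.mem_cons_self
    unfold pvSieveStep pvSieveInner
    split
    · exact inner_sound p hp _ (fun k hk => (PySem.List.mem_pyRange_one.mp hk).1) arr hs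
    · exact hs

theorem replicate_sound (m : Nat) : SieveSound (List.replicate m false) := by
  intro i hi
  simp [List.getD_eq_getElem?_getD, List.getElem?_replicate] at hi
  split at hi <;> simp_all

theorem sieve_sound (n : Int) : SieveSound (pvSieve n) := by
  unfold pvSieve
  exact outer_sound n _ (fun p hp => (PySem.List.mem_pyRange_one.mp hp).1) _
    (replicate_sound _)

theorem sieve_complete (n a : Int) (_h1 : 1 ≤ a) (h2 : a ≤ n) (hd : HasSmallDiv a) :
    (pvSieve n).getD a.toNat false = true := by
  obtain ⟨b, hb2, hbb, hdvd⟩ := hd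
  have ha4 : 4 ≤ a := by nlinarith
  have hAa : ((a.toNat : Nat) : Int) = a := Int.toNat_of_nonneg (by omega)
  have hqprime : (a.toNat.minFac).Prime := Nat.minFac_prime (by omega)
  have hqdvd : a.toNat.minFac ∣ a.toNat := Nat.minFac_dvd a.toNat
  have hq2 : 2 ≤ a.toNat.minFac := hqprime.two_le
  have hbA : b.toNat ∣ a.toNat := by
    have hd2 : ((b.toNat : Nat) : Int) ∣ ((a.toNat : Nat) : Int) := by
      rw [hAa, Int.toNat_of_nonneg (by omega)]
      exact hdvd
    exact_mod_cast hd2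
  have hnotprime : ¬ a.toNat.Prime := by
    intro hp
    rcases hp.eq_one_or_self_of_dvd b.toNat hbA with h | h
    · omega
    · have : b < a := by nlinarith
      omega
  have hqsq : a.toNat.minFac * a.toNat.minFac ≤ a.toNat := by
    have := Nat.minFac_sq_le_self (by omega : 0 < a.toNat) hnotprime
    rwa [pow_two] at this
  have hqsqrt : a.toNat.minFac ≤ Nat.sqrt n.toNat := Nat.le_sqrt.mpr (le_trans hqsq (by omega))
  have hq2' : (2 : Int) ≤ (a.toNat.minFac : Int) := by exact_mod_cast hq2
  have hqlt : (a.toNat.minFac : Int) < pvSqrtFloor n + 1 := by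
    unfold pvSqrtFloor; omega
  have hsplit : PySem.List.pyRange 2 (pvSqrtFloor n + 1) =
      PySem.List.pyRange 2 (a.toNat.minFac : Int) ++ (a.toNat.minFac : Int) ::
        PySem.List.pyRange ((a.toNat.minFac : Int) + 1) (pvSqrtFloor n + 1) := by
    rw [PySem.List.pyRange_one_append 2 (a.toNat.minFac : Int) (pvSqrtFloor n + 1) hq2' (by omega),
      PySem.List.pyRange_one_cons hqlt]
  unfold pvSieve
  rw [hsplit, List.foldl_append, List.foldl_cons]
  have hsound1 : SieveSound ((PySem.List.pyRange 2 (a.toNat.minFac : Int)).foldl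
      (pvSieveStep n) (List.replicate (n + 1).toNat false)) :=
    outer_sound n _ (fun p hp => (PySem.List.mem_pyRange_one.mp hp).1) _ (replicate_sound _)
  have hlen1 : ((PySem.List.pyRange 2 (a.toNat.minFac : Int)).foldl
      (pvSieveStep n) (List.replicate (n + 1).toNat false)).length = (n + 1).toNat := by
    rw [outer_length]; simp
  apply outer_mono
  rw [pvSieveStep]
  have hcond : PySem.List.pyGetD ((PySem.List.pyRange 2 (a.toNat.minFac : Int)).foldl
      (pvSieveStep n) (List.replicate (n + 1).toNat false)) (a.toNat.minFac : Int) false = false := by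
    rw [PySem.List.pyGetD_of_nonneg _ _ (by omega)]
    cases hg : ((PySem.List.pyRange 2 (a.toNat.minFac : Int)).foldl
        (pvSieveStep n) (List.replicate (n + 1).toNat false)).getD ((a.toNat.minFac : Int)).toNat false with
    | false => rfl
    | true =>
      exfalso
      apply not_compN_of_prime a.toNat.minFac hqprime
      have := hsound1 _ hg
      rwa [Int.toNat_natCast] at this
  rw [if_pos hcond]
  unfold pvSieveInner
  have hk0mul : (a.toNat.minFac : Int) * ((a.toNat / a.toNat.minFac : Nat) : Int) = a := by
    have hm : a.toNat.minFac * (a.toNat / a.toNat.minFac) = a.toNat := Nat.mul_div_cancel' hqdvd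
    have h3 : ((a.toNat.minFac * (a.toNat / a.toNat.minFac) : Nat) : Int) = ((a.toNat : Nat) : Int) := by
      exact_mod_cast hm
    rw [Nat.cast_mul, hAa] at h3
    exact h3
  have hk0mem : ((a.toNat / a.toNat.minFac : Nat) : Int) ∈
      PySem.List.pyRange (a.toNat.minFac : Int) (PySem.Int.floordiv n (a.toNat.minFac : Int) + 1) := by
    refine PySem.List.mem_pyRange_one.mpr ⟨?_, ?_⟩
    · have : a.toNat.minFac ≤ a.toNat / a.toNat.minFac :=
        (Nat.le_div_iff_mul_le (by omega)).mpr hqsq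
      exact_mod_cast this
    · have hle : ((a.toNat / a.toNat.minFac : Nat) : Int) ≤ PySem.Int.floordiv n (a.toNat.minFac : Int) := by
        rw [PySem.Int.le_floordiv_iff_mul_le (by omega), mul_comm, hk0mul]
        exact h2
      omega
  have hmark := inner_complete (a.toNat.minFac : Int) ((a.toNat / a.toNat.minFac : Nat) : Int)
    (by rw [hk0mul]; omega) _ _ hk0mem (by rw [hk0mul, hlen1]; omega)
  rwa [hk0mul] at hmark

theorem sieve_true_iff (n a : Int) (h1 : 1 ≤ a) (h2 : a ≤ n) :
    (pvSieve n).getD a.toNat false = true ↔ HasSmallDiv a := by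
  constructor
  · intro h
    exact (comp_iff a h1).mp (sieve_sound n a.toNat h)
  · exact sieve_complete n a h1 h2

theorem dict_step_eq (d : PySem.Dict String Int) (s : String) :
    (match d.get? s with
     | some v => d.insert s (v + 1)
     | none   => d.insert s 1) = d.insert s (d.getD s 0 + 1) := by
  cases h : d.get? s <;> simp [PySem.Dict.getD_eq_get?_getD, h]

-- ===== VERDICT (by name: the statement is the Claim_ definition above) =====
theorem hex_dictionary_spec : Claim_equal_hex_dictionary := by
  intro n _
  unfold Spec_hex_dictionary hex_dictionary hex_dictionary_alt prime_to_hex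
  by_cases hn : n < 1
  · rw [if_pos hn, PySem.List.pyRange_one_eq_nil (by omega)]
    rfl
  · rw [if_neg hn]
    show ((((PySem.List.pyRange 1 (n + 1)).filter is_prime).map
        (fun a => '0' :: 'x' :: pvHexDigits a.toNat)).foldl
        (fun d a =>
          (a.drop 2).foldl
            (fun d ch =>
              let s := String.ofList [ch]
              match d.get? s with
              | some v => d.insert s (v + 1)
              | none   => d.insert s 1) d)
        (PySem.Dict.empty : PySem.Dict String Int)).items =
      ((PySem.List.pyRange 1 (n + 1)).foldl
        (fun d a =>
          if PySem.List.pyGetD (pvSieve n) a false = false then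
            (pvHexDigits a.toNat).foldl
              (fun d ch =>
                let s := String.ofList [ch]
                d.insert s (d.getD s 0 + 1)) d
          else d)
        (PySem.Dict.empty : PySem.Dict String Int)).items
    rw [List.foldl_map,
      PySem.List.foldl_ite_eq_foldl_filter
        (p := fun a => PySem.List.pyGetD (pvSieve n) a false = false)
        (f := fun (d : PySem.Dict String Int) (a : Int) => (pvHexDigits a.toNat).foldl
          (fun (d : PySem.Dict String Int) (ch : Char) =>
            let s := String.ofList [ch]
            d.insert s (d.getD s 0 + 1)) d)]
    have hfil : (PySem.List.pyRange 1 (n + 1)).filter is_prime =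
        (PySem.List.pyRange 1 (n + 1)).filter
          (fun a => decide (PySem.List.pyGetD (pvSieve n) a false = false)) := by
      apply List.filter_congr
      intro a hmem
      obtain ⟨ha1, ha2⟩ := PySem.List.mem_pyRange_one.mp hmem
      rw [Bool.eq_iff_iff, is_prime_iff a (by omega), decide_eq_true_iff,
        PySem.List.pyGetD_of_nonneg _ _ (by omega : (0:Int) ≤ a)]
      constructor
      · intro h
        cases hg : (pvSieve n).getD a.toNat false with
        | false => rfl
        | true => exact absurd ((sieve_true_iff n a ha1 (by omega)).mp hg) h
      · intro h hhas
        rw [(sieve_true_iff n a ha1 (by omega)).mpr hhas] at h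
        cases h
    rw [hfil]
    congr 1
    apply PySem.List.foldl_congr_mem
    intro acc x _
    show (pvHexDigits x.toNat).foldl
        (fun d ch =>
          let s := String.ofList [ch]
          match d.get? s with
          | some v => d.insert s (v + 1)
          | none   => d.insert s 1) acc = _
    apply PySem.List.foldl_congr_mem
    intro d ch _
    exact dict_step_eq d (String.ofList [ch])
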